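-- pv_equiv track=rewrite | github.com/codesquad-backend-study/algorithm-study | programmers/fia/week45/크레인 인형뽑기 게임.py | solution
-- ===== SOURCE A (Python) =====
-- def solution(board, moves):
--     vertical = [[] for _ in range(len(board))]
--
--     for row in range(len(board) - 1, -1, -1):
--         for col in range(len(board)):
--             if board[row][col] != 0:
--                 vertical[col].append(board[row][col])
--
--     basket = []
--     count = 0
--
--     for move in moves:
--         col = move - 1
--
--         if vertical[col]:
--             doll = vertical[col].pop()
--
--             if basket and basket[-1] == doll:
--                 basket.pop()
--                 count += 2
--             else:
--                 basket.append(doll)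
--
--     return count
-- ===== SOURCE B (Python) =====
-- def solution(board, moves):
--     n = len(board)
--     cols = [[row[c] for row in board] for c in range(n)]   # column c, top-down (board is not mutated)
--     tops = [0] * n          # per-column pointer to the first row not yet consumed
--     basket = []
--     count = 0
--     for move in moves:
--         col = move - 1
--         column = cols[col]
--         r = tops[col]
--         while r < n and column[r] == 0:
--             r += 1
--         if r < n:
--             doll = column[r]
--             tops[col] = r + 1
--             if basket and basket[-1] == doll:
--                 basket.pop()
--                 count += 2
--             else:
--                 basket.append(doll)
--     return count
-- ===== Notes on version B (the rewrite author's own statement) =====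
-- stated objective: alternative
-- what changed: B drops A's up-front pass that filters the board into per-column doll stacks popped on each move, and instead transposes the board once and keeps a lazily advanced top pointer per column, skipping zeros on demand; the basket/count logic is unchanged.
import Mathlib
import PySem

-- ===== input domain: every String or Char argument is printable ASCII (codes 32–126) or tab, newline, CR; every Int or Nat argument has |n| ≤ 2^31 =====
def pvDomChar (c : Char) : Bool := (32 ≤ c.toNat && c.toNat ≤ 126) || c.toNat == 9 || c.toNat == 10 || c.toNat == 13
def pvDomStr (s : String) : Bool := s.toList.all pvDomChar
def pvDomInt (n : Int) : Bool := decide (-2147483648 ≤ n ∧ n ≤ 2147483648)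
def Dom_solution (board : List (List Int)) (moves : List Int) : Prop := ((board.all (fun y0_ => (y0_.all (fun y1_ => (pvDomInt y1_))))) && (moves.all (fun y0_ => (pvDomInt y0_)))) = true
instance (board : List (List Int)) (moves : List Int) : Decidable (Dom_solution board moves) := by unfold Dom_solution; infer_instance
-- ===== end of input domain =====

-- B replaces A's up-front construction of filtered per-column doll stacks (pop-mutated per move)
-- by a plain transpose of the board plus one lazily advanced top pointer per column;
-- same basket/count logic per move. Neither implementation mutates its arguments.

-- board[row][col] for in-range nonnegative indices (all such accesses are in range inside Pre_)
def pvCell (board : List (List Int)) (row col : Nat) : Int := (board.getD row []).getD col 0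

-- ===== PORT A =====
-- the doll-picking step of A's `for move in moves` loop, state = (vertical, basket, count);
-- `vertical[col]` read / popped with Python index semantics (negative col wraps) via pyGetD/pySetD
def aStep (st : List (List Int) × List Int × Int) (move : Int) : List (List Int) × List Int × Int :=
  let vert := st.1; let basket := st.2.1; let count := st.2.2
  let col := move - 1
  let stack := PySem.List.pyGetD vert col []
  if stack ≠ [] then
    let doll := stack.getLast?.getD 0                       -- vertical[col].pop(): value popped …
    let vert' := PySem.List.pySetD vert col stack.dropLast  -- … and the shortened stack written back
    if basket ≠ [] ∧ basket.getLast?.getD 0 = doll then (vert', basket.dropLast, count + 2)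
    else (vert', basket ++ [doll], count)
  else st

-- the two nested build loops: `for row in range(len(board)-1,-1,-1): for col in range(len(board)): …`
-- (`range` rendered as List.range / .reverse — exact for these arguments; row/col are in-range Nats)
def aBuild (board : List (List Int)) : List (List Int) :=
  ((List.range board.length).reverse).foldl
    (fun v row => (List.range board.length).foldl
      (fun v col => if pvCell board row col ≠ 0 then v.set col (v.getD col [] ++ [pvCell board row col]) else v) v)
    (List.replicate board.length ([] : List Int))

def solution (board : List (List Int)) (moves : List Int) : Int :=
  (moves.foldl aStep (aBuild board, ([] : List Int), (0 : Int))).2.2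

-- ===== PORT B =====
-- B's `while r < n and column[r] == 0: r += 1` (r is a nonnegative in-range index, so List.getD is exact)
def bAdvance (column : List Int) (n : Nat) (r : Nat) : Nat :=
  if h : r < n then
    if column.getD r 0 = 0 then bAdvance column n (r + 1) else r
  else r
termination_by n - r

-- B's per-move step, state = (tops, basket, count); cols/tops indexed with Python semantics
def bStep (n : Nat) (cols : List (List Int)) (st : List Nat × List Int × Int) (move : Int) :
    List Nat × List Int × Int :=
  let tops := st.1; let basket := st.2.1; let count := st.2.2
  let col := move - 1
  let column := PySem.List.pyGetD cols col []
  let r := bAdvance column n (PySem.List.pyGetD tops col 0)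
  if r < n then
    let doll := column.getD r 0
    let tops' := PySem.List.pySetD tops col (r + 1)
    if basket ≠ [] ∧ basket.getLast?.getD 0 = doll then (tops', basket.dropLast, count + 2)
    else (tops', basket ++ [doll], count)
  else st

def solution_alt (board : List (List Int)) (moves : List Int) : Int :=
  let n := board.length
  let cols := (List.range n).map (fun c => board.map (fun row => row.getD c 0))
  (moves.foldl (bStep n cols) (List.replicate n (0 : Nat), ([] : List Int), (0 : Int))).2.2

-- ===== PRECONDITION & SPEC =====
-- Pre_ is exactly the set of inputs on which A returns (B raises on the very same inputs):
-- every row at least as long as the number of rows n (else board[row][col] raises IndexError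
-- in A's build pass, and row[c] in B's transpose), and every move with move-1 a valid Python
-- index into a length-n list, i.e. -n ≤ move-1 < n (else vertical[col] / cols[col] raises).
def Pre_solution (board : List (List Int)) (moves : List Int) : Prop :=
  (∀ row ∈ board, board.length ≤ row.length) ∧
  (∀ m ∈ moves, -(board.length : Int) ≤ m - 1 ∧ m - 1 < (board.length : Int))
instance (board : List (List Int)) (moves : List Int) : Decidable (Pre_solution board moves) := by
  unfold Pre_solution; infer_instance

def pvWitness_solution : List (List Int) × List Int := ([[0, 5], [3, 3]], [2, 1, 2])

def Spec_solution (board : List (List Int)) (moves : List Int) (out : Int) : Prop := out = solution_alt board moves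
instance (board : List (List Int)) (moves : List Int) (out : Int) : Decidable (Spec_solution board moves out) := by unfold Spec_solution; infer_instance

-- ===== CLAIM (what is proved, stated in full; the proofs are below) =====
def Claim_equal_solution : Prop := ∀ (board : List (List Int)) (moves : List Int), Dom_solution board moves → Pre_solution board moves → Spec_solution board moves (solution board moves)

-- ===== LEMMAS AND PROOFS =====

-- the not-yet-consumed dolls of column `col`, top-down, starting at row `r`
def colFrom (board : List (List Int)) (col : Nat) (r : Nat) : List Int :=
  if r < board.length then
    (if pvCell board r col = 0 then [] else [pvCell board r col]) ++ colFrom board col (r + 1)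
  else []
termination_by board.length - r

-- the dolls of column `col` in rows 0..k-1, top-down
def colTo (board : List (List Int)) (col : Nat) : Nat → List Int
  | 0 => []
  | (k+1) => colTo board col k ++ (if pvCell board k col = 0 then [] else [pvCell board k col])

theorem pyIdx_norm (len : Nat) (i : Int) (h1 : -(len : Int) ≤ i) (h2 : i < len) :
    PySem.List.pyIdx? len i = some (if 0 ≤ i then i.toNat else (i + len).toNat) := by
  simp only [PySem.List.pyIdx?]
  split_ifs <;> first | rfl | omega | (congr 1; omega)

theorem pyGetD_norm {α : Type} (xs : List α) (i : Int) (d : α)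
    (h1 : -(xs.length : Int) ≤ i) (h2 : i < xs.length) :
    PySem.List.pyGetD xs i d = xs.getD (if 0 ≤ i then i.toNat else (i + xs.length).toNat) d := by
  simp [PySem.List.pyGetD, PySem.List.pyGet?, pyIdx_norm _ _ h1 h2, List.getD_eq_getElem?_getD]

theorem pySetD_norm {α : Type} (xs : List α) (i : Int) (v : α)
    (h1 : -(xs.length : Int) ≤ i) (h2 : i < xs.length) :
    PySem.List.pySetD xs i v = xs.set (if 0 ≤ i then i.toNat else (i + xs.length).toNat) v := by
  simp [PySem.List.pySetD, PySem.List.pySet?, pyIdx_norm _ _ h1 h2]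

theorem bAdvance_spec (board : List (List Int)) (j : Nat) (column : List Int)
    (hcol : ∀ r, r < board.length → column.getD r 0 = pvCell board r j) (r : Nat) :
    colFrom board j r = colFrom board j (bAdvance column board.length r) ∧
    (bAdvance column board.length r < board.length → pvCell board (bAdvance column board.length r) j ≠ 0) ∧
    (¬ bAdvance column board.length r < board.length → colFrom board j r = []) := by
  induction hn : board.length - r generalizing r with
  | zero =>
    have h : ¬ r < board.length := by omega
    rw [show bAdvance column board.length r = r by rw [bAdvance, dif_neg h]]
    exact ⟨rfl, fun hr => absurd hr h, fun _ => by rw [colFrom]; simp [h]⟩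
  | succ k ih =>
    by_cases h : r < board.length
    · by_cases hc : pvCell board r j = 0
      · rw [show bAdvance column board.length r = bAdvance column board.length (r+1) by
            rw [bAdvance, dif_pos h, hcol r h, if_pos hc]]
        rw [show colFrom board j r = colFrom board j (r+1) by rw [colFrom]; simp [h, hc]]
        exact ih (r+1) (by omega)
      · rw [show bAdvance column board.length r = r by rw [bAdvance, dif_pos h, hcol r h, if_neg hc]]
        exact ⟨rfl, fun _ => hc, fun hn => absurd h hn⟩
    · rw [show bAdvance column board.length r = r by rw [bAdvance, dif_neg h]]
      exact ⟨rfl, fun hr => absurd hr h, fun _ => by rw [colFrom]; simp [h]⟩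

theorem inner_length (board : List (List Int)) (row : Nat) (cols : List Nat) :
    ∀ (v : List (List Int)),
    (cols.foldl (fun v col => if pvCell board row col ≠ 0 then v.set col (v.getD col [] ++ [pvCell board row col]) else v) v).length = v.length := by
  induction cols with
  | nil => intro v; rfl
  | cons a t ih => intro v; simp only [List.foldl_cons]; rw [ih]; split_ifs <;> simp

theorem inner_getD (board : List (List Int)) (row : Nat) (cols : List Nat) :
    ∀ (v : List (List Int)) (c : Nat), c < v.length → cols.Nodup →
    (cols.foldl (fun v col => if pvCell board row col ≠ 0 then v.set col (v.getD col [] ++ [pvCell board row col]) else v) v).getD c []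
      = v.getD c [] ++ (if c ∈ cols ∧ pvCell board row c ≠ 0 then [pvCell board row c] else []) := by
  induction cols with
  | nil => intro v c _ _; simp
  | cons a t ih =>
    intro v c hc hnd
    obtain ⟨ha, hnd'⟩ := List.nodup_cons.mp hnd
    simp only [List.foldl_cons]
    have hlen : c < (if pvCell board row a ≠ 0 then v.set a (v.getD a [] ++ [pvCell board row a]) else v).length := by
      split_ifs <;> simpa using hc
    rw [ih _ c hlen hnd']
    by_cases hca : c = a
    · subst hca
      have hct : c ∉ t := ha
      have hfalse : ¬(c ∈ t ∧ pvCell board row c ≠ 0) := fun hcon => hct hcon.1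
      rw [if_neg hfalse]
      by_cases h1 : pvCell board row c = 0
      · simp [h1]
      · simp [h1, hc, List.getD_eq_getElem?_getD]
    · have h2 : (if pvCell board row a ≠ 0 then v.set a (v.getD a [] ++ [pvCell board row a]) else v).getD c []
          = v.getD c [] := by
        split_ifs with h1
        · simp [List.getD_eq_getElem?_getD, Ne.symm hca]
        · rfl
      rw [h2]
      have : (c ∈ a :: t) ↔ (c ∈ t) := by simp [hca]
      simp [this]

theorem build_loop (board : List (List Int)) (k : Nat) :
    ∀ (v : List (List Int)), v.length = board.length →
    (((List.range k).reverse).foldl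
      (fun v row => (List.range board.length).foldl
        (fun v col => if pvCell board row col ≠ 0 then v.set col (v.getD col [] ++ [pvCell board row col]) else v) v) v).length = board.length ∧
    ∀ c, c < board.length →
    (((List.range k).reverse).foldl
      (fun v row => (List.range board.length).foldl
        (fun v col => if pvCell board row col ≠ 0 then v.set col (v.getD col [] ++ [pvCell board row col]) else v) v) v).getD c []
      = v.getD c [] ++ (colTo board c k).reverse := by
  induction k with
  | zero => intro v hv; exact ⟨hv, fun c _ => by simp [colTo]⟩
  | succ k ih =>
    intro v hv
    rw [show (List.range (k+1)).reverse = k :: (List.range k).reverse by simp [List.range_succ]]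
    simp only [List.foldl_cons]
    have hv1 : ((List.range board.length).foldl
        (fun v col => if pvCell board k col ≠ 0 then v.set col (v.getD col [] ++ [pvCell board k col]) else v) v).length = board.length := by
      rw [inner_length]; exact hv
    obtain ⟨hl, hg⟩ := ih _ hv1
    refine ⟨hl, fun c hc => ?_⟩
    rw [hg c hc]
    rw [inner_getD board k _ v c (by omega) (List.nodup_range ..)]
    have hmem : c ∈ List.range board.length := List.mem_range.mpr hc
    simp only [colTo, List.reverse_append, List.append_assoc]
    by_cases h0 : pvCell board k c = 0 <;> simp [h0, hmem]

theorem colTo_colFrom (board : List (List Int)) (c : Nat) :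
    ∀ k, k ≤ board.length → colTo board c k ++ colFrom board c k = colFrom board c 0 := by
  intro k
  induction k with
  | zero => intro _; simp [colTo]
  | succ k ih =>
    intro hk
    have hklt : k < board.length := by omega
    have hunf : colFrom board c k = (if pvCell board k c = 0 then [] else [pvCell board k c]) ++ colFrom board c (k+1) := by
      rw [colFrom]; simp [hklt]
    calc colTo board c (k+1) ++ colFrom board c (k+1)
        = colTo board c k ++ ((if pvCell board k c = 0 then [] else [pvCell board k c]) ++ colFrom board c (k+1)) := by
          simp [colTo, List.append_assoc]
      _ = colTo board c k ++ colFrom board c k := by rw [hunf]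
      _ = colFrom board c 0 := ih (by omega)

theorem aBuild_spec (board : List (List Int)) :
    (aBuild board).length = board.length ∧
    ∀ c, c < board.length → (aBuild board).getD c [] = (colFrom board c 0).reverse := by
  obtain ⟨hl, hg⟩ := build_loop board board.length (List.replicate board.length [])
    (by simp)
  refine ⟨hl, fun c hc => ?_⟩
  unfold aBuild
  rw [hg c hc]
  have h1 : colTo board c board.length = colFrom board c 0 := by
    have := colTo_colFrom board c board.length le_rfl
    rw [show colFrom board c board.length = [] by rw [colFrom]; simp] at this
    simpa using this
  simp [List.getD_eq_getElem?_getD, hc, h1]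

theorem cols_getD (board : List (List Int)) (j : Nat) (hj : j < board.length) :
    ((List.range board.length).map (fun c => board.map (fun row => row.getD c 0))).getD j []
      = board.map (fun row => row.getD j 0) := by
  simp [List.getD_eq_getElem?_getD, hj]

theorem column_cell (board : List (List Int)) (j r : Nat) (hr : r < board.length) :
    (board.map (fun row => row.getD j 0)).getD r 0 = pvCell board r j := by
  simp [List.getD_eq_getElem?_getD, hr, pvCell]

theorem loop_eq (board : List (List Int)) (ms : List Int) :
    ∀ (vert : List (List Int)) (tops : List Nat) (basket : List Int) (count : Int),
    vert.length = board.length → tops.length = board.length →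
    (∀ c, c < board.length → vert.getD c [] = (colFrom board c (tops.getD c 0)).reverse) →
    (∀ m ∈ ms, -(board.length : Int) ≤ m - 1 ∧ m - 1 < (board.length : Int)) →
    (ms.foldl aStep (vert, basket, count)).2.2 =
    (ms.foldl (bStep board.length ((List.range board.length).map (fun c => board.map (fun row => row.getD c 0)))) (tops, basket, count)).2.2 := by
  induction ms with
  | nil => intro vert tops basket count _ _ _ _; rfl
  | cons m t ih =>
    intro vert tops basket count hvl htl hinv hms
    obtain ⟨hm1, hm2⟩ := hms m (List.mem_cons_self ..)
    have hms' : ∀ x ∈ t, -(board.length : Int) ≤ x - 1 ∧ x - 1 < (board.length : Int) :=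
      fun x hx => hms x (List.mem_cons_of_mem _ hx)
    set j := (if 0 ≤ m - 1 then (m - 1).toNat else (m - 1 + board.length).toNat) with hjdef
    have hj : j < board.length := by rw [hjdef]; split_ifs <;> omega
    have hGv : PySem.List.pyGetD vert (m - 1) [] = vert.getD j [] := by
      rw [pyGetD_norm vert (m-1) [] (by omega) (by omega), hvl]
    have hGt : PySem.List.pyGetD tops (m - 1) 0 = tops.getD j 0 := by
      rw [pyGetD_norm tops (m-1) 0 (by omega) (by omega), htl]
    have hGc : PySem.List.pyGetD ((List.range board.length).map (fun c => board.map (fun row => row.getD c 0))) (m - 1) []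
        = board.map (fun row => row.getD j 0) := by
      rw [pyGetD_norm _ (m-1) [] (by simp; omega) (by simp; omega)]
      simp only [List.length_map, List.length_range]
      rw [← hjdef, cols_getD board j hj]
    have hcolfun : ∀ r, r < board.length → (board.map (fun row => row.getD j 0)).getD r 0 = pvCell board r j :=
      fun r hr => column_cell board j r hr
    set t0 := tops.getD j 0 with ht0
    set a := bAdvance (board.map (fun row => row.getD j 0)) board.length t0 with hadef
    obtain ⟨heq, hcell, hempty⟩ := bAdvance_spec board j (board.map (fun row => row.getD j 0)) hcolfun t0
    have hstack : vert.getD j [] = (colFrom board j t0).reverse := hinv j hj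
    simp only [List.foldl_cons]
    by_cases ha : a < board.length
    · have hcf : colFrom board j a = pvCell board a j :: colFrom board j (a+1) := by
        rw [colFrom, if_pos ha, if_neg (hcell ha)]; rfl
      have hstack' : vert.getD j [] = (pvCell board a j :: colFrom board j (a+1)).reverse := by
        rw [hstack, heq, ← hadef, hcf]
      have hne : vert.getD j [] ≠ [] := by rw [hstack']; simp
      have hdoll : (vert.getD j []).getLast?.getD 0 = pvCell board a j := by
        rw [hstack']; simp
      have hdrop : (vert.getD j []).dropLast = (colFrom board j (a+1)).reverse := by
        rw [hstack', List.dropLast_reverse]; rfl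
      have hA : aStep (vert, basket, count) m =
          (vert.set j (colFrom board j (a+1)).reverse,
           if basket ≠ [] ∧ basket.getLast?.getD 0 = pvCell board a j then basket.dropLast else basket ++ [pvCell board a j],
           if basket ≠ [] ∧ basket.getLast?.getD 0 = pvCell board a j then count + 2 else count) := by
        simp only [aStep, hGv]
        rw [if_pos hne, hdoll, hdrop,
            pySetD_norm vert (m-1) _ (by omega) (by omega), hvl, ← hjdef]
        split_ifs <;> rfl
      have hB : bStep board.length ((List.range board.length).map (fun c => board.map (fun row => row.getD c 0))) (tops, basket, count) m =
          (tops.set j (a + 1),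
           if basket ≠ [] ∧ basket.getLast?.getD 0 = pvCell board a j then basket.dropLast else basket ++ [pvCell board a j],
           if basket ≠ [] ∧ basket.getLast?.getD 0 = pvCell board a j then count + 2 else count) := by
        simp only [bStep, hGc, hGt, ← hadef]
        rw [if_pos ha, hcolfun a ha,
            pySetD_norm tops (m-1) _ (by omega) (by omega), htl, ← hjdef]
        split_ifs <;> rfl
      rw [hA, hB]
      apply ih
      · simpa using hvl
      · simpa using htl
      · intro c hc
        by_cases hcc : c = j
        · subst hcc
          rw [List.getD_eq_getElem?_getD, List.getElem?_set, List.getD_eq_getElem?_getD, List.getElem?_set]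
          simp [hvl ▸ hc, htl ▸ hc]
        · have e1 : (vert.set j (colFrom board j (a+1)).reverse).getD c [] = vert.getD c [] := by
            simp [List.getD_eq_getElem?_getD, Ne.symm hcc]
          have e2 : (tops.set j (a + 1)).getD c 0 = tops.getD c 0 := by
            simp [List.getD_eq_getElem?_getD, Ne.symm hcc]
          rw [e1, e2]; exact hinv c hc
      · exact hms'
    · have hstack0 : vert.getD j [] = [] := by rw [hstack, hempty ha]; rfl
      have hA : aStep (vert, basket, count) m = (vert, basket, count) := by
        simp only [aStep, hGv]
        rw [hstack0]; simp
      have hB : bStep board.length ((List.range board.length).map (fun c => board.map (fun row => row.getD c 0))) (tops, basket, count) m = (tops, basket, count) := by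
        simp only [bStep, hGc, hGt, ← hadef]
        rw [if_neg ha]
      rw [hA, hB]
      exact ih vert tops basket count hvl htl hinv hms'

-- ===== VERDICT (by name: the statement is the Claim_ definition above) =====
theorem solution_spec : Claim_equal_solution := by
  intro board moves _ hpre
  unfold Spec_solution solution solution_alt
  obtain ⟨hbl, hbg⟩ := aBuild_spec board
  apply loop_eq
  · exact hbl
  · simp
  · intro c hc
    rw [hbg c hc]
    congr 1
    simp [List.getD_eq_getElem?_getD, hc]
  · intro m hm; exact hpre.2 m hm
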